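-- pv_equiv track=rewrite | github.com/KleinFourGroup/NLP_PL | LM/TypeUtils.py | splitLit
-- ===== SOURCE A (Python) =====
-- def splitLit(s):
--     ret = []
--     inStr = False
--     inChar = False
--     prevChar = None
--     curpart = ""
--     for ch in s:
--         if ch == ' ':
--             if inChar or inStr:
--                 curpart += ch
--             else:
--                 if len(curpart) > 0:
--                     ret.append(curpart)
--                     curpart = ""
--         elif ch == '\\':
--             curpart += ch
--             ch = "DONT END STR"
--         elif ch == '"':
--             curpart += ch
--             if not (prevChar == '\\' or inChar):
--                 inStr = not inStr
--         elif ch == '\'':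
--             curpart += ch
--             if not (prevChar == '\\' or inStr):
--                 inChar = not inChar
--         elif ch in '\r\n\t':
--             if len(curpart) > 0:
--                 ret.append(curpart)
--                 curpart = ""
--         else:
--             curpart += ch
--         prevChar = ch
--     if len(curpart) > 0:
--         ret.append(curpart)
--     return ret
-- ===== SOURCE B (Python) =====
-- def splitLit(s):
--     # pass 1: per-character flag: is this char inside a string/char literal?
--     prot = []
--     inStr = False
--     inChar = False
--     for ch in s:
--         prot.append(inStr or inChar)
--         if ch == '"' and not inChar:
--             inStr = not inStr
--         elif ch == "'" and not inStr:
--             inChar = not inChar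
--     # pass 2: emit tokens
--     ret = []
--     cur = []
--     for ch, p in zip(s, prot):
--         if (ch == ' ' and not p) or ch in '\r\n\t':
--             if cur:
--                 ret.append(''.join(cur))
--                 cur = []
--         else:
--             cur.append(ch)
--     if cur:
--         ret.append(''.join(cur))
--     return ret
-- ===== Notes on version B (the rewrite author's own statement) =====
-- stated objective: simpler
-- what changed: Replaced A's single five-variable state machine (ret/inStr/inChar/prevChar/curpart with a dead prevChar=='\' check and per-character branch ladder) by two passes: a scan that labels each character with an inside-a-literal flag, then a flag-driven token-emission pass with one combined flush condition.
import Mathlib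
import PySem

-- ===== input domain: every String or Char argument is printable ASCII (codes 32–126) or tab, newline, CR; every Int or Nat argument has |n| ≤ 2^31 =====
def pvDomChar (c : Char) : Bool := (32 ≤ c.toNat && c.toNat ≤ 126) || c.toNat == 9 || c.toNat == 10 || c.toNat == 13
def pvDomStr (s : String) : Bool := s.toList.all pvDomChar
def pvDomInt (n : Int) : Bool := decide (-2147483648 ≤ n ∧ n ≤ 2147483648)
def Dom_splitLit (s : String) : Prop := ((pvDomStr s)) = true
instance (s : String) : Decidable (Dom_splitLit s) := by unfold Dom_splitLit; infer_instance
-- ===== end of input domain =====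

-- B replaces A's single five-variable state machine by two passes: a scan that labels each
-- character with an 'inside a literal' flag, then a flag-driven token-emission pass (objective: simpler).

-- ===== PORT A =====
-- state: ret, inStr, inChar, prevChar (None at start; note the '\\' branch sets it to "DONT END STR"), curpart
def splitLitGo (l : List Char) (ret : List String) (inStr inChar : Bool)
    (prev : Option String) (cur : List Char) : List String :=
  match l with
  | [] => if cur.length > 0 then ret ++ [String.mk cur] else ret
  | ch :: t =>
    if ch = ' ' then
      if inChar || inStr then
        splitLitGo t ret inStr inChar (some (String.mk [ch])) (cur ++ [ch])
      else if cur.length > 0 then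
        splitLitGo t (ret ++ [String.mk cur]) inStr inChar (some (String.mk [ch])) []
      else
        splitLitGo t ret inStr inChar (some (String.mk [ch])) cur
    else if ch = '\\' then
      splitLitGo t ret inStr inChar (some "DONT END STR") (cur ++ [ch])
    else if ch = '"' then
      let inStr' := if !(prev = some "\\" || inChar) then !inStr else inStr
      splitLitGo t ret inStr' inChar (some (String.mk [ch])) (cur ++ [ch])
    else if ch = '\'' then
      let inChar' := if !(prev = some "\\" || inStr) then !inChar else inChar
      splitLitGo t ret inStr inChar' (some (String.mk [ch])) (cur ++ [ch])
    else if ch = '\r' ∨ ch = '\n' ∨ ch = '\t' then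
      if cur.length > 0 then
        splitLitGo t (ret ++ [String.mk cur]) inStr inChar (some (String.mk [ch])) []
      else
        splitLitGo t ret inStr inChar (some (String.mk [ch])) cur
    else
      splitLitGo t ret inStr inChar (some (String.mk [ch])) (cur ++ [ch])

def splitLit (s : String) : List String :=
  splitLitGo s.toList [] false false none []

-- ===== PORT B =====
-- pass 1: flag per character — was it inside a string/char literal when reached?
def protFlags (inStr inChar : Bool) (l : List Char) : List Bool :=
  match l with
  | [] => []
  | ch :: t =>
    (inStr || inChar) ::
      (if ch = '"' ∧ !inChar then protFlags (!inStr) inChar t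
       else if ch = '\'' ∧ !inStr then protFlags inStr (!inChar) t
       else protFlags inStr inChar t)

-- pass 2: emit tokens driven by the flags
def emitGo (l : List (Char × Bool)) (ret : List String) (cur : List Char) : List String :=
  match l with
  | [] => if cur ≠ [] then ret ++ [String.mk cur] else ret
  | (ch, p) :: t =>
    if (ch = ' ' ∧ !p) ∨ ch = '\r' ∨ ch = '\n' ∨ ch = '\t' then
      if cur ≠ [] then emitGo t (ret ++ [String.mk cur]) []
      else emitGo t ret cur
    else
      emitGo t ret (cur ++ [ch])

def splitLit_alt (s : String) : List String :=
  emitGo (s.toList.zip (protFlags false false s.toList)) [] []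

-- ===== PRECONDITION & SPEC =====
def Spec_splitLit (s : String) (out : List String) : Prop := out = splitLit_alt s
instance (s : String) (out : List String) : Decidable (Spec_splitLit s out) := by unfold Spec_splitLit; infer_instance

-- ===== CLAIM (what is proved, stated in full; the proofs are below) =====
def Claim_equal_splitLit : Prop := ∀ (s : String), Dom_splitLit s → Spec_splitLit s (splitLit s)

-- ===== LEMMAS AND PROOFS =====

theorem pvToListMk (l : List Char) : (String.mk l).toList = l :=
  Eq.symm (String.ofList_eq.mp rfl)

theorem pvMkSingleNe (c : Char) (h : c ≠ '\\') : String.mk [c] ≠ "\\" := by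
  intro h'
  apply h
  have h2 := congrArg String.toList h'
  rw [pvToListMk] at h2
  rw [show ("\\" : String).toList = ['\\'] from by decide] at h2
  simpa using h2

theorem pvPrevNe (c : Char) (h : c ≠ '\\') :
    some (String.mk [c]) ≠ (some "\\" : Option String) := by
  intro h'
  exact pvMkSingleNe c h (Option.some.inj h')

theorem splitLitGo_eq_emitGo (l : List Char) (ret : List String) (inStr inChar : Bool)
    (prev : Option String) (cur : List Char) (hprev : prev ≠ some "\\") :
    splitLitGo l ret inStr inChar prev cur
      = emitGo (l.zip (protFlags inStr inChar l)) ret cur := by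
  induction l generalizing ret inStr inChar prev cur with
  | nil => simp [splitLitGo, emitGo, List.length_pos_iff]
  | cons ch t ih =>
    have hpr : (prev = some "\\") = False := by simp [hprev]
    by_cases h1 : ch = ' '
    · subst h1
      cases hSt : inStr <;> cases hCh : inChar <;>
        simp [splitLitGo, protFlags, emitGo, List.length_pos_iff] <;>
        first
          | exact ih _ _ _ _ _ (pvPrevNe _ (by decide))
          | (by_cases hc : cur = [] <;> (try simp [hc]) <;> exact ih _ _ _ _ _ (pvPrevNe _ (by decide)))
    · by_cases h2 : ch = '\\'
      · subst h2
        simp [splitLitGo, protFlags, emitGo]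
        exact ih _ _ _ _ _ (by decide)
      · by_cases h3 : ch = '"'
        · subst h3
          cases hCh : inChar <;>
            simp [splitLitGo, protFlags, emitGo, hpr] <;>
            exact ih _ _ _ _ _ (pvPrevNe _ (by decide))
        · by_cases h4 : ch = '\''
          · subst h4
            cases hSt : inStr <;>
              simp [splitLitGo, protFlags, emitGo, hpr] <;>
              exact ih _ _ _ _ _ (pvPrevNe _ (by decide))
          · by_cases h5 : ch = '\r' ∨ ch = '\n' ∨ ch = '\t'
            · rcases h5 with h5 | h5 | h5 <;> subst h5 <;>
                simp [splitLitGo, protFlags, emitGo, List.length_pos_iff] <;>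
                first
                  | exact ih _ _ _ _ _ (pvPrevNe _ (by decide))
                  | (by_cases hc : cur = [] <;> (try simp [hc]) <;>
                      exact ih _ _ _ _ _ (pvPrevNe _ (by decide)))
            · simp [splitLitGo, protFlags, emitGo, h1, h2, h3, h4, h5]
              exact ih _ _ _ _ _ (pvPrevNe _ h2)

-- ===== VERDICT (by name: the statement is the Claim_ definition above) =====
theorem splitLit_spec : Claim_equal_splitLit := by
  intro s _
  unfold Spec_splitLit splitLit splitLit_alt
  exact splitLitGo_eq_emitGo _ _ _ _ _ _ (by simp)
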